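-- pv_equiv track=rewrite | github.com/Rhuuuyyyy/mapa | app/utils/mapa_mapper.py | _normalize_product_name
-- ===== SOURCE A (Python) =====
-- def _normalize_product_name(descricao: str) -> str:
--     """
--     Normalize product name for MAPA report.
--
--     Args:
--         descricao: Raw product description
--
--     Returns:
--         Normalized product name (uppercase, clean)
--     """
--     if not descricao:
--         return ""
--
--     # Convert to uppercase
--     name = descricao.upper().strip()
--
--     # Common normalizations for fertilizers
--     replacements = {
--         'UREIA GRANULADA GRANEL': 'UREIA - MINERAL SIMPLES',
--         'UREIA GRANULADA': 'UREIA - MINERAL SIMPLES',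
--         'UREIA GRANEL': 'UREIA - MINERAL SIMPLES',
--         'UREIA': 'UREIA - MINERAL SIMPLES',
--     }
--
--     for old, new in replacements.items():
--         if old in name:
--             return new
--
--     return name
-- ===== SOURCE B (Python) =====
-- def _normalize_product_name(descricao: str) -> str:
--     if not descricao:
--         return ""
--     name = descricao.upper().strip()
--     # Every replacement key contains 'UREIA' and all map to the same value,
--     # so a single substring test replaces the table scan.
--     if 'UREIA' in name:
--         return 'UREIA - MINERAL SIMPLES'
--     return name
-- ===== Notes on version B (the rewrite author's own statement) =====
-- stated objective: simpler
-- what changed: Replaced the four-entry replacement dict and its scanning loop by a single 'UREIA' substring test, valid because every key contains 'UREIA' and all keys map to the same value.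
import Mathlib
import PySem

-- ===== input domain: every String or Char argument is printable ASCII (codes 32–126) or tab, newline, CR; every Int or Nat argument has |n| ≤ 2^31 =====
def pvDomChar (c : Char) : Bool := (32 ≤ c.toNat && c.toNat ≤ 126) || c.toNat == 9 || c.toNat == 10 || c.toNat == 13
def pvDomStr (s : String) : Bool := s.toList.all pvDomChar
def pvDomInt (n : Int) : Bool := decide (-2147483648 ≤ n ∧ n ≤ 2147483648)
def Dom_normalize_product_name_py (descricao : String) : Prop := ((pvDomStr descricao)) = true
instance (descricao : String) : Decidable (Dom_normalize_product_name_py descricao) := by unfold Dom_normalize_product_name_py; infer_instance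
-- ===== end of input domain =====

-- B replaces A's replacement-table loop with one 'UREIA' substring test (all keys contain 'UREIA', all values equal).
-- ===== PORT A =====
def pvReplacementsA : List (String × String) :=
  [("UREIA GRANULADA GRANEL", "UREIA - MINERAL SIMPLES"),
   ("UREIA GRANULADA", "UREIA - MINERAL SIMPLES"),
   ("UREIA GRANEL", "UREIA - MINERAL SIMPLES"),
   ("UREIA", "UREIA - MINERAL SIMPLES")]

def pvLoopA : List (String × String) → String → String
  | [], name => name
  | (old, new) :: rest, name =>
      if PySem.Str.isIn old name then new else pvLoopA rest name

def normalize_product_name_py (descricao : String) : String :=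
  if descricao == "" then ""
  else
    let name := PySem.Str.strip (PySem.Str.upper descricao)
    pvLoopA pvReplacementsA name

-- ===== PORT B =====
def normalize_product_name_py_alt (descricao : String) : String :=
  if descricao == "" then ""
  else
    let name := PySem.Str.strip (PySem.Str.upper descricao)
    if PySem.Str.isIn "UREIA" name then "UREIA - MINERAL SIMPLES" else name

-- ===== PRECONDITION & SPEC =====
def Spec_normalize_product_name_py (descricao : String) (out : String) : Prop := out = normalize_product_name_py_alt descricao
instance (descricao : String) (out : String) : Decidable (Spec_normalize_product_name_py descricao out) := by unfold Spec_normalize_product_name_py; infer_instance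

-- ===== CLAIM =====
def Claim_equal_normalize_product_name_py : Prop := ∀ (descricao : String), Dom_normalize_product_name_py descricao → Spec_normalize_product_name_py descricao (normalize_product_name_py descricao)

-- ===== LEMMAS AND PROOFS =====
-- if a longer key (with "UREIA" as an infix) occurs in name, so does "UREIA"
theorem pv_isIn_of_key (old name : String)
    (hsub : ("UREIA".toList) <:+: old.toList)
    (h : PySem.Str.isIn old name = true) : PySem.Str.isIn "UREIA" name = true := by
  unfold PySem.Str.isIn at h ⊢
  rw [PySem.Chars.isIn_iff_infix] at h ⊢
  exact hsub.trans h

theorem pv_loop_eq (name : String) :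
    pvLoopA pvReplacementsA name =
      (if PySem.Str.isIn "UREIA" name then "UREIA - MINERAL SIMPLES" else name) := by
  by_cases h : PySem.Str.isIn "UREIA" name = true
  · simp only [pvReplacementsA, pvLoopA, h, if_true]
    split_ifs <;> rfl
  · have hk : ∀ old : String, ("UREIA".toList) <:+: old.toList →
        PySem.Str.isIn old name = false := by
      intro old hsub
      by_contra hc
      exact h (pv_isIn_of_key old name hsub (by simpa using hc))
    have hb : PySem.Str.isIn "UREIA" name = false := by simpa using h
    simp only [pvReplacementsA, pvLoopA,
      hk "UREIA GRANULADA GRANEL" (by decide),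
      hk "UREIA GRANULADA" (by decide),
      hk "UREIA GRANEL" (by decide), hb, Bool.false_eq_true, if_false]

-- ===== VERDICT =====
theorem normalize_product_name_py_spec : Claim_equal_normalize_product_name_py := by
  intro descricao _
  unfold Spec_normalize_product_name_py normalize_product_name_py normalize_product_name_py_alt
  by_cases h : descricao = ""
  · subst h; rfl
  · have hb : (descricao == "") = false := by simpa using h
    simp only [hb, Bool.false_eq_true, if_false]
    exact pv_loop_eq _
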